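-- pv_equiv track=rewrite | github.com/cairis-platform/cairis | cairis/misc/DocumentBuilder.py | paraText
-- ===== SOURCE A (Python) =====
-- def paraText(txt):
--   inPara = False
--   if (txt.find('\n') >= 0):
--     paraTxt = '<para>'
--     inPara = True
--   else:
--     paraTxt = ''
--   for c in txt:
--     if (c == '\n'):
--       paraTxt += '</para><para>'
--       inPara = True
--     elif c == '&':
--       paraTxt += '&amp;'
--     else:
--       paraTxt += c
--   if (inPara == True):
--     paraTxt += "</para>"
--   return paraTxt
-- ===== SOURCE B (Python) =====
-- def paraText(txt):
--   parts = txt.split('\n')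
--   escaped = [p.replace('&', '&amp;') for p in parts]
--   if len(parts) > 1:
--     return '<para>' + '</para><para>'.join(escaped) + '</para>'
--   return escaped[0]
-- ===== Notes on version B (the rewrite author's own statement) =====
-- stated objective: faster
-- what changed: Replaces the char-by-char accumulation loop with an inPara flag by a split-on-newline / escape-each-segment / join decomposition guarded on the number of segments.
import Mathlib
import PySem

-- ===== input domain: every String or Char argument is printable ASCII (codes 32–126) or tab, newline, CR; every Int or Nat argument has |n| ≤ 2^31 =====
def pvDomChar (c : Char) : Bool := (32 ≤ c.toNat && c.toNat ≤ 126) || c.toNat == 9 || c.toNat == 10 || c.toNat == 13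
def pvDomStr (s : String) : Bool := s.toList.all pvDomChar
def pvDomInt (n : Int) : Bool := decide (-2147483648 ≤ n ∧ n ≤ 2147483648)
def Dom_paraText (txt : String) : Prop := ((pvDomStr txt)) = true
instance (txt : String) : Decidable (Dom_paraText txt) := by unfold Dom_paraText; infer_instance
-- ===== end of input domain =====

-- B replaces A's char-by-char accumulation loop (with its inPara flag) by a
-- split-on-newline / escape-each-segment / join decomposition (measured faster: join avoids quadratic string +=).

-- ===== PORT A =====
-- A accumulates a growing string char by char; the accumulator is kept as a
-- List Char (Lean's String primitives are kernel-opaque) and packed at the end.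
def paraText (txt : String) : String :=
  let cs := txt.toList
  let st0 : List Char × Bool :=
    if PySem.Str.find txt "\n" ≥ 0 then ("<para>".toList, true) else ([], false)
  let st := cs.foldl (fun st c =>
    if c = '\n' then (st.1 ++ "</para><para>".toList, true)
    else if c = '&' then (st.1 ++ "&amp;".toList, st.2)
    else (st.1 ++ [c], st.2)) st0
  String.mk (if st.2 then st.1 ++ "</para>".toList else st.1)

-- ===== PORT B =====
def paraText_alt (txt : String) : String :=
  let parts := PySem.Chars.splitOn txt.toList ['\n']        -- txt.split('\n')
  let escaped := parts.map (fun p => PySem.Chars.replace p ['&'] "&amp;".toList)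
  if parts.length > 1 then
    String.mk ("<para>".toList ++ PySem.Chars.join "</para><para>".toList escaped ++ "</para>".toList)
  else
    String.mk (escaped.headD [])                            -- escaped[0] (split never returns [])

-- ===== PRECONDITION & SPEC =====
def Spec_paraText (txt : String) (out : String) : Prop := out = paraText_alt txt
instance (txt : String) (out : String) : Decidable (Spec_paraText txt out) := by unfold Spec_paraText; infer_instance

-- ===== CLAIM (what is proved, stated in full; the proofs are below) =====
def Claim_equal_paraText : Prop := ∀ (txt : String), Dom_paraText txt → Spec_paraText txt (paraText txt)

-- ===== LEMMAS AND PROOFS =====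

/-- what the escape step emits per char -/
def escAmp (c : Char) : List Char := if c = '&' then "&amp;".toList else [c]

/-- what A's loop body appends per char -/
def emitA (c : Char) : List Char := if c = '\n' then "</para><para>".toList else escAmp c

/-- Python's s.split('\n') on char lists, structurally -/
def splitNl : List Char → List (List Char)
  | [] => [[]]
  | c :: r => if c = '\n' then [] :: splitNl r else (splitNl r).modifyHead (c :: ·)

theorem splitNl_ne_nil (s : List Char) : splitNl s ≠ [] := by
  cases s with
  | nil => simp [splitNl]
  | cons c r =>
    simp only [splitNl]
    split
    · simp
    · cases h : splitNl r with
      | nil => exact absurd h (splitNl_ne_nil r)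
      | cons a t => simp [List.modifyHead]

theorem foldlA (cs : List Char) (acc : List Char) (b : Bool) :
    cs.foldl (fun st c =>
      if c = '\n' then (st.1 ++ "</para><para>".toList, true)
      else if c = '&' then (st.1 ++ "&amp;".toList, st.2)
      else (st.1 ++ [c], st.2)) (acc, b)
    = (acc ++ cs.flatMap emitA, b || cs.any (· = '\n')) := by
  induction cs generalizing acc b with
  | nil => simp
  | cons c r ih =>
    simp only [List.foldl_cons]
    by_cases h : c = '\n'
    · subst h
      rw [if_pos rfl, ih]
      simp [emitA]
    · by_cases h2 : c = '&'
      · subst h2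
        rw [if_neg h, if_pos rfl, ih]
        simp [emitA, escAmp, h]
      · rw [if_neg h, if_neg h2, ih]
        simp [emitA, escAmp, h, h2]

theorem singleton_infix_iff (a : Char) (l : List Char) : [a] <:+: l ↔ a ∈ l := by
  constructor
  · intro h
    exact (List.singleton_sublist).mp h.sublist
  · intro h
    obtain ⟨s, t, rfl⟩ := List.append_of_mem h
    exact ⟨s, t, by simp⟩

theorem replace_go_amp (s : List Char) (fuel : Nat) (acc : List Char)
    (h : s.length ≤ fuel) :
    PySem.Chars.replace.go ['&'] "&amp;".toList fuel s acc
      = acc.reverse ++ s.flatMap escAmp := by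
  induction s generalizing fuel acc with
  | nil => cases fuel <;> simp [PySem.Chars.replace.go]
  | cons c r ih =>
    cases fuel with
    | zero => simp at h
    | succ f =>
      simp only [PySem.Chars.replace.go]
      by_cases hc : c = '&'
      · subst hc
        rw [if_pos (by simp [List.isPrefixOf])]
        simp only [List.length_cons] at h
        rw [show List.drop ['&'].length ('&' :: r) = r from rfl, ih _ _ (by omega)]
        simp [escAmp]
      · rw [if_neg (by simp [List.isPrefixOf]; exact fun e => hc e.symm)]
        simp only [List.length_cons] at h
        rw [ih _ _ (by omega)]
        simp [escAmp, hc]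

theorem replace_amp (s : List Char) :
    PySem.Chars.replace s ['&'] "&amp;".toList = s.flatMap escAmp := by
  rw [PySem.Chars.replace, if_neg (by simp)]
  simpa using replace_go_amp s s.length []

theorem splitOnGo (s : List Char) (fuel : Nat) (cur : List Char) (acc : List (List Char))
    (h : s.length ≤ fuel) :
    PySem.Chars.splitOn.go ['\n'] fuel s cur acc
      = acc.reverse ++ (splitNl s).modifyHead (cur.reverse ++ ·) := by
  induction s generalizing fuel cur acc with
  | nil => cases fuel <;> simp [PySem.Chars.splitOn.go, splitNl, List.modifyHead]
  | cons c r ih =>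
    cases fuel with
    | zero => simp at h
    | succ f =>
      simp only [PySem.Chars.splitOn.go]
      by_cases hc : c = '\n'
      · subst hc
        rw [if_pos (by simp [List.isPrefixOf])]
        simp only [List.length_cons] at h
        rw [show List.drop ['\n'].length ('\n' :: r) = r from rfl, ih _ _ _ (by omega)]
        obtain ⟨a, t, ht⟩ := List.exists_cons_of_ne_nil (splitNl_ne_nil r)
        simp [splitNl, ht, List.modifyHead]
      · rw [if_neg (by simp [List.isPrefixOf]; exact fun e => hc e.symm)]
        simp only [List.length_cons] at h
        rw [ih _ _ _ (by omega)]
        obtain ⟨a, t, ht⟩ := List.exists_cons_of_ne_nil (splitNl_ne_nil r)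
        simp [splitNl, hc, ht, List.modifyHead]

theorem splitOn_nl (s : List Char) :
    PySem.Chars.splitOn s ['\n'] = splitNl s := by
  rw [PySem.Chars.splitOn, splitOnGo s _ [] [] (by omega)]
  obtain ⟨a, t, ht⟩ := List.exists_cons_of_ne_nil (splitNl_ne_nil s)
  simp [ht, List.modifyHead]

theorem splitNl_length (s : List Char) :
    1 < (splitNl s).length ↔ s.any (· = '\n') = true := by
  induction s with
  | nil => simp [splitNl]
  | cons c r ih =>
    by_cases hc : c = '\n'
    · subst hc
      have := List.length_pos_iff.mpr (splitNl_ne_nil r)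
      simp [splitNl]; omega
    · obtain ⟨a, t, ht⟩ := List.exists_cons_of_ne_nil (splitNl_ne_nil r)
      simp [splitNl, hc, ht, List.modifyHead] at *
      exact ih

theorem splitNl_no_nl (s : List Char) (h : s.any (· = '\n') = false) :
    splitNl s = [s] := by
  induction s with
  | nil => simp [splitNl]
  | cons c r ih =>
    simp only [List.any_cons, Bool.or_eq_false_iff] at h
    have hc : c ≠ '\n' := by simpa [decide_eq_false_iff_not] using h.1
    simp [splitNl, hc, ih h.2, List.modifyHead]

theorem intercalate_cons_cons (sep x y : List Char) (ys : List (List Char)) :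
    List.intercalate sep (x :: y :: ys) = x ++ sep ++ List.intercalate sep (y :: ys) := by
  simp [List.intercalate, List.intersperse]

theorem intercalate_head_append (sep p x : List Char) (xs : List (List Char)) :
    List.intercalate sep ((p ++ x) :: xs) = p ++ List.intercalate sep (x :: xs) := by
  cases xs with
  | nil => simp [List.intercalate]
  | cons y ys => simp [intercalate_cons_cons, List.append_assoc]

theorem flatMap_emitA (s : List Char) :
    s.flatMap emitA
      = List.intercalate "</para><para>".toList ((splitNl s).map (·.flatMap escAmp)) := by
  induction s with
  | nil => simp [splitNl, List.intercalate]
  | cons c r ih =>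
    by_cases hc : c = '\n'
    · subst hc
      obtain ⟨a, t, ht⟩ := List.exists_cons_of_ne_nil (splitNl_ne_nil r)
      rw [List.flatMap_cons, ih, show splitNl ('\n' :: r) = [] :: splitNl r from by
        simp [splitNl], ht]
      simp only [List.map_cons, intercalate_cons_cons, List.flatMap_nil]
      simp [emitA]
    · obtain ⟨a, t, ht⟩ := List.exists_cons_of_ne_nil (splitNl_ne_nil r)
      rw [List.flatMap_cons, ih, show splitNl (c :: r) = (splitNl r).modifyHead (c :: ·) from by
        simp [splitNl, hc], ht, List.modifyHead]
      simp only [List.map_cons, List.flatMap_cons]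
      rw [intercalate_head_append]
      simp [emitA, hc]

theorem flatMap_emitA_no_nl (s : List Char) (h : s.any (· = '\n') = false) :
    s.flatMap emitA = s.flatMap escAmp := by
  induction s with
  | nil => simp
  | cons c r ih =>
    simp only [List.any_cons, Bool.or_eq_false_iff] at h
    have hc : c ≠ '\n' := by simpa [decide_eq_false_iff_not] using h.1
    simp [emitA, hc, ih h.2]

theorem find_nl_iff (txt : String) :
    (PySem.Str.find txt "\n" ≥ 0) ↔ txt.toList.any (· = '\n') = true := by
  rw [ge_iff_le, PySem.Str.find_eq, PySem.Chars.find_nonneg_iff]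
  show ('\n' :: "".toList) <:+: txt.toList ↔ _
  rw [show ('\n' :: "".toList) = ['\n'] from rfl, singleton_infix_iff]
  simp

-- ===== VERDICT (by name: the statement is the Claim_ definition above) =====
theorem paraText_spec : Claim_equal_paraText := by
  intro txt _
  unfold Spec_paraText paraText paraText_alt
  have hmap : (splitNl txt.toList).map (fun p => PySem.Chars.replace p ['&'] "&amp;".toList)
      = (splitNl txt.toList).map (·.flatMap escAmp) :=
    List.map_congr_left fun a _ => replace_amp a
  simp only [splitOn_nl, hmap]
  by_cases h : txt.toList.any (· = '\n') = true
  · rw [if_pos ((find_nl_iff txt).mpr h), foldlA,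
      if_pos ((splitNl_length txt.toList).mpr h)]
    simp [flatMap_emitA, PySem.Chars.join]
  · have h' : txt.toList.any (· = '\n') = false := Bool.eq_false_iff.mpr h
    rw [if_neg (fun hf => h ((find_nl_iff txt).mp hf)), foldlA]
    simp only [h', Bool.or_false, if_neg (Bool.false_ne_true)]
    rw [if_neg (fun hl => h ((splitNl_length txt.toList).mp hl))]
    rw [splitNl_no_nl _ h', flatMap_emitA_no_nl _ h']
    simp
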